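-- pv_equiv track=rewrite | github.com/vittoriop17/mouse_behavior | utils/dataset.py | get_n_frames
-- ===== SOURCE A (Python) =====
-- def check_params_for_sequence(in_size, kernel, stride):
--     conv1d_out_size = (in_size - kernel) / stride + 1
--     assert conv1d_out_size % 1 == 0, "Something went wront. The output of conv1d should have an integer dimension. Not float"
--     return int(conv1d_out_size)
--
-- def get_n_frames(in_size, kernel, stride):
--     out_size = None
--     for new_in_size in range(in_size, in_size // 2, -1):
--         try:
--             out_size = check_params_for_sequence(new_in_size, kernel, stride)
--             break
--         except:
--             pass
--     if out_size is None:
--         raise ValueError("No feasible input value. Try to change kernel (sequence length) and stride values")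
--     return new_in_size, out_size
-- ===== SOURCE B (Python) =====
-- def get_n_frames(in_size, kernel, stride):
--     # O(1): the largest new_in_size <= in_size with (new_in_size - kernel) divisible by
--     # stride is in_size minus the residue; it must still exceed in_size // 2.
--     if stride == 0:
--         raise ValueError("No feasible input value. Try to change kernel (sequence length) and stride values")
--     new_in_size = in_size - (in_size - kernel) % abs(stride)
--     if new_in_size <= in_size // 2:
--         raise ValueError("No feasible input value. Try to change kernel (sequence length) and stride values")
--     return new_in_size, (new_in_size - kernel) // stride + 1
-- ===== Notes on version B (the rewrite author's own statement) =====
-- stated objective: faster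
-- what changed: Replaces the descending linear search over range(in_size, in_size//2, -1) with a closed-form modular-arithmetic computation of the largest feasible input size.
import Mathlib
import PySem

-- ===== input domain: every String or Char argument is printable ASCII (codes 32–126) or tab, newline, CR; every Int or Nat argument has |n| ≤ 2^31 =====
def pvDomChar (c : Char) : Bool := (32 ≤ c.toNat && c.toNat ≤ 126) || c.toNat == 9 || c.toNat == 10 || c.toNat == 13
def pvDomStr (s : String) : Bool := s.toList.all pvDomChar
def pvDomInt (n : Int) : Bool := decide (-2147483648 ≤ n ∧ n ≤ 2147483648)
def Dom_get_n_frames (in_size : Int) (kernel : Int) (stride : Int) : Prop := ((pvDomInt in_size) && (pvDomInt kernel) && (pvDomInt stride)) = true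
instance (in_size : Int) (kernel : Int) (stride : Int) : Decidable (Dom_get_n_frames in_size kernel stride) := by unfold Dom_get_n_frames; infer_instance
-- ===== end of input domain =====

-- B replaces A's descending linear search with a closed-form modular computation of the
-- largest feasible input size (asymptotically faster); equality proved on Pre_ (A returns).


-- ===== PORT A =====
-- check_params_for_sequence: returns some out_size where the Python returns, none where it
-- raises (ZeroDivisionError when stride == 0, AssertionError when not divisible).
-- On Dom (|ints| ≤ 2^31) the float test '((v-kernel)/stride) % 1 == 0' is exact divisibility,
-- and int() of the exact-integer float quotient is floordiv; ported via divmod?.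
def pvCheckParams? (in_size : Int) (kernel : Int) (stride : Int) : Option Int :=
  match PySem.Int.divmod? (in_size - kernel) stride with
  | none => none
  | some (q, r) => if r = 0 then some (q + 1) else none

-- the for-loop with try/except/break over range(in_size, in_size//2, -1): the counter is
-- consumed lazily, one value per iteration, exactly as Python's range object yields it
def pvLoopA (kernel : Int) (stride : Int) (stop : Int) (new_in_size : Int) : Option (Int × Int) :=
  if _h : stop < new_in_size then
    match pvCheckParams? new_in_size kernel stride with
    | some o => some (new_in_size, o)
    | none => pvLoopA kernel stride stop (new_in_size - 1)
  else none
termination_by (new_in_size - stop).toNat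
decreasing_by omega

def get_n_frames (in_size : Int) (kernel : Int) (stride : Int) : List Int :=
  match pvLoopA kernel stride (PySem.Int.floordiv in_size 2) in_size with
  | some (v, o) => [v, o]
  | none => []  -- Python raises ValueError here; excluded by Pre_

-- ===== PORT B =====
def get_n_frames_alt (in_size : Int) (kernel : Int) (stride : Int) : List Int :=
  if stride = 0 then []  -- Python B raises ValueError; excluded by Pre_
  else
    let v := in_size - PySem.Int.mod (in_size - kernel) (stride.natAbs : Int)
    if v ≤ PySem.Int.floordiv in_size 2 then []  -- Python B raises ValueError; excluded by Pre_
    else [v, PySem.Int.floordiv (v - kernel) stride + 1]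

-- ===== PRECONDITION & SPEC =====
-- Pre_ holds exactly where Python A returns: stride ≠ 0 (else every iteration divides by
-- zero) and the largest size ≤ in_size congruent to kernel mod stride still exceeds
-- in_size // 2 (else the loop exhausts and A raises ValueError).
def Pre_get_n_frames (in_size : Int) (kernel : Int) (stride : Int) : Prop :=
  stride ≠ 0 ∧
  PySem.Int.floordiv in_size 2 < in_size - PySem.Int.mod (in_size - kernel) (stride.natAbs : Int)
instance (in_size : Int) (kernel : Int) (stride : Int) : Decidable (Pre_get_n_frames in_size kernel stride) := by unfold Pre_get_n_frames; infer_instance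

def pvWitness_get_n_frames : Int × Int × Int := (10, 2, 2)

def Spec_get_n_frames (in_size : Int) (kernel : Int) (stride : Int) (out : List Int) : Prop := out = get_n_frames_alt in_size kernel stride
instance (in_size : Int) (kernel : Int) (stride : Int) (out : List Int) : Decidable (Spec_get_n_frames in_size kernel stride out) := by unfold Spec_get_n_frames; infer_instance

-- ===== CLAIM (what is proved, stated in full; the proofs are below) =====
def Claim_equal_get_n_frames : Prop := ∀ (in_size : Int) (kernel : Int) (stride : Int), Dom_get_n_frames in_size kernel stride → Pre_get_n_frames in_size kernel stride → Spec_get_n_frames in_size kernel stride (get_n_frames in_size kernel stride)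

-- ===== LEMMAS AND PROOFS =====

-- A's loop on the countdown range returns the FIRST (largest) feasible size v.
lemma pvLoopA_finds (kernel stride v : Int) (hs : stride ≠ 0)
    (hdvd : stride ∣ (v - kernel)) :
    ∀ (n : Nat) (a b : Int), a = v + n → b < v →
    (∀ w, v < w → w ≤ a → ¬ stride ∣ (w - kernel)) →
    pvLoopA kernel stride b a =
      some (v, PySem.Int.floordiv (v - kernel) stride + 1) := by
  intro n
  induction n with
  | zero =>
    intro a b ha hb _
    subst ha
    have h0 : (v - kernel).fmod stride = 0 := by
      have := (PySem.Int.mod_eq_zero_iff_dvd (v - kernel) stride).mpr hdvd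
      simpa [PySem.Int.mod] using this
    rw [pvLoopA, dif_pos (by omega : b < v + ((0:Nat):Int))]
    simp [pvCheckParams?, PySem.Int.divmod?, PySem.Int.floordiv, hs, h0]
  | succ m ih =>
    intro a b ha hb hmax
    have hav : v < a := by omega
    rw [pvLoopA, dif_pos (by omega : b < a)]
    have hnd : ¬ stride ∣ (a - kernel) := hmax a hav le_rfl
    have hm0 : (a - kernel).fmod stride ≠ 0 := by
      intro h
      exact hnd ((PySem.Int.mod_eq_zero_iff_dvd _ _).mp (by simpa [PySem.Int.mod] using h))
    simp only [pvCheckParams?, PySem.Int.divmod?, if_neg hs, if_neg hm0]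
    exact ih (a - 1) b (by omega) hb (fun w h1 h2 => hmax w h1 (by omega))

theorem pre_main (in_size kernel stride : Int)
    (hp : Pre_get_n_frames in_size kernel stride) :
    get_n_frames in_size kernel stride = get_n_frames_alt in_size kernel stride := by
  obtain ⟨hs, hlt⟩ := hp
  set m : Int := (stride.natAbs : Int) with hm
  have hm0 : 0 < m := by rw [hm]; omega
  set r : Int := PySem.Int.mod (in_size - kernel) m with hr
  have hr0 : 0 ≤ r := PySem.Int.mod_nonneg _ hm0
  have hrm : r < m := PySem.Int.mod_lt _ hm0
  set v : Int := in_size - r with hv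
  have hmd : stride ∣ m := by rw [hm]; exact Int.dvd_natAbs.mpr dvd_rfl
  have hdvd : stride ∣ (v - kernel) := by
    have heq := PySem.Int.floordiv_mul_add_mod (in_size - kernel) m
    have hveq : v - kernel = PySem.Int.floordiv (in_size - kernel) m * m := by
      rw [hv]; omega
    rw [hveq]
    exact dvd_mul_of_dvd_right hmd _
  have hmax : ∀ w, v < w → w ≤ in_size → ¬ stride ∣ (w - kernel) := by
    intro w h1 h2 hw
    have h3 : stride ∣ (w - v) := by
      have := dvd_sub hw hdvd
      simpa [sub_sub_sub_cancel_right] using this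
    have hmw : m ∣ (w - v) := by rw [hm]; exact Int.natAbs_dvd.mpr h3
    have : m ≤ w - v := Int.le_of_dvd (by omega) hmw
    omega
  have hloop := pvLoopA_finds kernel stride v hs hdvd r.toNat in_size
    (PySem.Int.floordiv in_size 2) (by omega) (by omega) hmax
  unfold get_n_frames get_n_frames_alt
  rw [← hm, ← hr, ← hv, hloop, if_neg hs]
  simp only []
  rw [if_neg (by omega : ¬ v ≤ PySem.Int.floordiv in_size 2)]

-- ===== VERDICT (by name: the statement is the Claim_ definition above) =====
theorem get_n_frames_spec : Claim_equal_get_n_frames := by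
  intro i k s _ hp
  unfold Spec_get_n_frames
  exact pre_main i k s hp
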